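-- pv_equiv track=rewrite | github.com/liuderwhat/hacker_rank | Collections/Piling Up.py | check_stack
-- ===== SOURCE A (Python) =====
-- def check_stack(cube_length):
--
--     stack = []
--     l = 0
--     r = len(cube_length)-1
--     flag = True
--     for x in range(len(cube_length)):
--         if flag:
--             if cube_length[l] < cube_length[r]:
--
--                 if not(stack):
--
--                     stack.append(cube_length[r])
--                     r -= 1
--                 else:
--
--                     if cube_length[r] <= stack[x-1]:
--                         stack.append(cube_length[r])
--                         r -= 1
--                     else:
--                         flag = False
--
--             elif cube_length[l] >= cube_length[r]:
--
--                 if  not(stack):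
--                     stack.append(cube_length[l])
--                     l += 1
--                 else:
--
--                     if cube_length[l] <= stack[x-1]:
--                         stack.append(cube_length[l])
--                         l += 1
--                     else:
--                         flag = False
--         else:
--             break
--     return flag
-- ===== SOURCE B (Python) =====
-- def check_stack(cube_length):
--     # Single forward pass over adjacent pairs: once an ascent is seen,
--     # any later descent makes the pile impossible.
--     ascending = False
--     for a, b in zip(cube_length, cube_length[1:]):
--         if a < b:
--             ascending = True
--         elif a > b and ascending:
--             return False
--     return True
-- ===== Notes on version B (the rewrite author's own statement) =====
-- stated objective: simpler
-- what changed: Replaces A's inward two-pointer greedy (l/r indices plus an explicit stack of placed cubes and a flag) with a single forward pass over adjacent pairs that rejects exactly when a descent follows an ascent (the 'valley' test), keeping only one boolean of state.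
import Mathlib
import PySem

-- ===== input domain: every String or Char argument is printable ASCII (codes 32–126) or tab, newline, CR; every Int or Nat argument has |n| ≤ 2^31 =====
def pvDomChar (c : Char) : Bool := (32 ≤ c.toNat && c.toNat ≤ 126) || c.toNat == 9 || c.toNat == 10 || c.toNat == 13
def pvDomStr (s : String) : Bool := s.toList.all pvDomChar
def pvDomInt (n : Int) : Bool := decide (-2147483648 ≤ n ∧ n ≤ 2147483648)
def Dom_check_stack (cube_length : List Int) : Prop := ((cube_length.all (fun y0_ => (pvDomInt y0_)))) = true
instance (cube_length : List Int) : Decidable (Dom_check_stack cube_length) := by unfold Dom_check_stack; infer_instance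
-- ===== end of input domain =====

-- B replaces A's inward two-pointer greedy with a single forward pass over adjacent
-- pairs (simpler: once an ascent is seen, any later descent fails).

-- ===== PORT A =====
-- loop body of A's 'for x in range(len(cube_length))'; state = (stack, l, r, flag).
-- All list indexing in A is in range whenever reached, so pyGetD _ _ 0 is exact there.
def aStep (cube_length : List Int) (st : List Int × Int × Int × Bool) (x : Int) :
    List Int × Int × Int × Bool :=
  match st with
  | (stack, l, r, flag) =>
    if flag then
      if PySem.List.pyGetD cube_length l 0 < PySem.List.pyGetD cube_length r 0 then
        if stack = [] then (stack ++ [PySem.List.pyGetD cube_length r 0], l, r - 1, flag)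
        else if PySem.List.pyGetD cube_length r 0 ≤ PySem.List.pyGetD stack (x - 1) 0 then
          (stack ++ [PySem.List.pyGetD cube_length r 0], l, r - 1, flag)
        else (stack, l, r, false)
      else -- Python's 'elif cube_length[l] >= cube_length[r]' is exhaustive on Int
        if stack = [] then (stack ++ [PySem.List.pyGetD cube_length l 0], l + 1, r, flag)
        else if PySem.List.pyGetD cube_length l 0 ≤ PySem.List.pyGetD stack (x - 1) 0 then
          (stack ++ [PySem.List.pyGetD cube_length l 0], l + 1, r, flag)
        else (stack, l, r, false)
    else st  -- 'break': once flag is False the remaining iterations do nothing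

def check_stack (cube_length : List Int) : Bool :=
  ((PySem.List.pyRange 0 cube_length.length 1).foldl (aStep cube_length)
    ([], 0, (cube_length.length : Int) - 1, true)).2.2.2

-- ===== PORT B =====
-- B's loop over zip(cube_length, cube_length[1:]) with the 'ascending' flag.
def bLoop (ascending : Bool) : List Int → Bool
  | a :: b :: rest =>
      if a < b then bLoop true (b :: rest)
      else if a > b && ascending then false
      else bLoop ascending (b :: rest)
  | _ => true

def check_stack_alt (cube_length : List Int) : Bool := bLoop false cube_length

-- ===== PRECONDITION & SPEC =====
def Spec_check_stack (cube_length : List Int) (out : Bool) : Prop := out = check_stack_alt cube_length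
instance (cube_length : List Int) (out : Bool) : Decidable (Spec_check_stack cube_length out) := by unfold Spec_check_stack; infer_instance

-- ===== CLAIM (what is proved, stated in full; the proofs are below) =====
def Claim_equal_check_stack : Prop := ∀ (cube_length : List Int), Dom_check_stack cube_length → Spec_check_stack cube_length (check_stack cube_length)

-- ===== LEMMAS AND PROOFS =====

-- ordering constraint against the current pile top (none = empty pile)
def ok (t : Option Int) (v : Int) : Bool :=
  match t with
  | none => true
  | some u => decide (v ≤ u)

-- non-decreasing / non-increasing runs of adjacent elements
def nondec : List Int → Bool
  | a :: b :: rest => decide (a ≤ b) && nondec (b :: rest)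
  | _ => true

def noninc : List Int → Bool
  | a :: b :: rest => decide (b ≤ a) && noninc (b :: rest)
  | _ => true

-- "valley": non-increasing, then non-decreasing
def valley : List Int → Bool
  | a :: b :: rest => if a < b then nondec (b :: rest) else valley (b :: rest)
  | _ => true

-- last element of the nonempty list a :: rest
def lastOf (a : Int) (rest : List Int) : Int := rest.getLastD a

lemma lastOf_cons (a c : Int) (r : List Int) : lastOf a (c :: r) = lastOf c r :=
  List.getLastD_cons

lemma cons_eq_dropLast_lastOf (a : Int) (rest : List Int) :
    (a :: rest).dropLast ++ [lastOf a rest] = a :: rest := by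
  induction rest generalizing a with
  | nil => rfl
  | cons c r ih => rw [List.dropLast_cons₂, lastOf_cons, List.cons_append, ih]

lemma nondec_le_lastOf (a : Int) (xs : List Int) (h : nondec (a :: xs) = true) :
    a ≤ lastOf a xs := by
  induction xs generalizing a with
  | nil => exact le_refl a
  | cons b r ih =>
    rw [nondec, Bool.and_eq_true, decide_eq_true_eq] at h
    rw [lastOf_cons]
    exact le_trans h.1 (ih b h.2)

lemma noninc_ge_lastOf (a : Int) (xs : List Int) (h : noninc (a :: xs) = true) :
    lastOf a xs ≤ a := by
  induction xs generalizing a with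
  | nil => exact le_refl a
  | cons b r ih =>
    rw [noninc, Bool.and_eq_true, decide_eq_true_eq] at h
    rw [lastOf_cons]
    exact le_trans (ih b h.2) h.1

-- both ends are ≤ the pile top
def okEnds (t : Option Int) : List Int → Bool
  | [] => true
  | a :: rest => ok t a && ok t (lastOf a rest)

-- abstract form of A's greedy: repeatedly remove the larger end, which must fit under t
def gre (t : Option Int) (seg : List Int) : Bool :=
  match seg with
  | [] => true
  | a :: rest =>
    if a < lastOf a rest then
      ok t (lastOf a rest) && gre (some (lastOf a rest)) (a :: rest).dropLast
    else
      ok t a && gre (some a) rest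
termination_by seg.length
decreasing_by
  · simpa using Nat.lt_succ_self rest.length
  · simpa using Nat.lt_succ_self rest.length

lemma bLoop_eq (l : List Int) : bLoop true l = nondec l ∧ bLoop false l = valley l := by
  induction l with
  | nil => exact ⟨rfl, rfl⟩
  | cons a rest ih =>
    cases rest with
    | nil => exact ⟨rfl, rfl⟩
    | cons b r2 =>
      refine ⟨?_, ?_⟩
      · show bLoop true (a :: b :: r2) = nondec (a :: b :: r2)
        rw [bLoop, nondec]
        rcases lt_trichotomy a b with h | h | h
        · simp [h, le_of_lt h, ih.1]
        · subst h; simp [ih.1]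
        · simp [show ¬ a < b from not_lt.mpr (le_of_lt h), show ¬ a ≤ b from not_le.mpr h]
      · show bLoop false (a :: b :: r2) = valley (a :: b :: r2)
        rw [bLoop, valley]
        by_cases h : a < b
        · simp [h, ih.1]
        · simp [h, ih.2]

lemma nondec_dropLast (xs : List Int) (b : Int) (h : nondec (xs ++ [b]) = true) :
    nondec xs = true := by
  induction xs with
  | nil => rfl
  | cons x ys ih =>
    cases ys with
    | nil => rfl
    | cons y r =>
      rw [List.cons_append, List.cons_append, nondec, Bool.and_eq_true] at h
      rw [nondec, Bool.and_eq_true]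
      exact ⟨h.1, ih (by simpa using h.2)⟩

lemma valley_dropLast (xs : List Int) (b : Int) (h : valley (xs ++ [b]) = true) :
    valley xs = true := by
  induction xs with
  | nil => rfl
  | cons x ys ih =>
    cases ys with
    | nil => rfl
    | cons y r =>
      rw [List.cons_append, List.cons_append, valley] at h
      rw [valley]
      by_cases hxy : x < y
      · rw [if_pos hxy] at h ⊢
        exact nondec_dropLast _ _ (by simpa using h)
      · rw [if_neg hxy] at h ⊢
        exact ih (by simpa using h)

lemma nondec_append_last (xs : List Int) (p b : Int) (h : nondec (xs ++ [p]) = true)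
    (hpb : p ≤ b) : nondec (xs ++ [p, b]) = true := by
  induction xs with
  | nil => simpa [nondec] using hpb
  | cons x ys ih =>
    cases ys with
    | nil =>
      simp only [List.nil_append, List.cons_append, nondec, Bool.and_eq_true] at h ⊢
      exact ⟨h.1, by simpa [nondec] using hpb⟩
    | cons y r =>
      rw [List.cons_append, List.cons_append, nondec, Bool.and_eq_true] at h ⊢
      exact ⟨h.1, by simpa using ih (by simpa using h.2)⟩

lemma valley_append_last (xs : List Int) (p b : Int) (h : valley (xs ++ [p]) = true)
    (hpb : p ≤ b) : valley (xs ++ [p, b]) = true := by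
  induction xs with
  | nil => simp [valley, not_lt.mpr hpb, hpb, nondec]
  | cons x ys ih =>
    cases ys with
    | nil =>
      simp only [List.nil_append, List.cons_append, valley]
      by_cases hxp : x < p
      · simpa [hxp, nondec] using hpb
      · simp [hxp, valley, not_lt.mpr hpb, hpb, nondec]
    | cons y r =>
      rw [List.cons_append, List.cons_append, valley] at h ⊢
      by_cases hxy : x < y
      · rw [if_pos hxy] at h ⊢
        exact by simpa using nondec_append_last (y :: r) p b (by rw [List.cons_append]; exact h) hpb
      · rw [if_neg hxy] at h ⊢
        exact by simpa using ih (by simpa using h)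

lemma nondec_last_pair (xs : List Int) (p b : Int) (h : nondec (xs ++ [p, b]) = true) :
    p ≤ b := by
  induction xs with
  | nil =>
    rw [List.nil_append, nondec, Bool.and_eq_true, decide_eq_true_eq] at h
    exact h.1
  | cons x ys ih =>
    cases ys with
    | nil =>
      simp only [List.nil_append, List.cons_append, nondec, Bool.and_eq_true] at h
      exact by simpa [nondec] using h.2
    | cons y r =>
      rw [List.cons_append, List.cons_append, nondec, Bool.and_eq_true] at h
      exact ih (by simpa using h.2)

lemma valley_desc_end (xs : List Int) (p b : Int) (h : valley (xs ++ [p, b]) = true)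
    (hpb : b < p) : noninc (xs ++ [p, b]) = true := by
  induction xs with
  | nil => simp [noninc, le_of_lt hpb]
  | cons x ys ih =>
    cases ys with
    | nil =>
      simp only [List.nil_append, List.cons_append, valley] at h
      by_cases hxp : x < p
      · rw [if_pos hxp] at h
        exact absurd (nondec_last_pair [] p b (by simpa [nondec] using h)) (not_le.mpr hpb)
      · simp only [List.nil_append, List.cons_append, noninc, Bool.and_eq_true]
        exact ⟨by simpa using not_lt.mp hxp, by simp [noninc, le_of_lt hpb]⟩
    | cons y r =>
      rw [List.cons_append, List.cons_append, valley] at h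
      by_cases hxy : x < y
      · rw [if_pos hxy] at h
        exact absurd (nondec_last_pair (y :: r) p b (by simpa using h)) (not_le.mpr hpb)
      · rw [if_neg hxy] at h
        rw [List.cons_append, List.cons_append, noninc, Bool.and_eq_true]
        exact ⟨by simpa using not_lt.mp hxy, by simpa using ih (by simpa using h)⟩

lemma ok_and_left (t : Option Int) (a b : Int) (hab : a ≤ b) :
    (ok t a && ok t b) = ok t b := by
  cases t with
  | none => rfl
  | some u =>
    by_cases h : b ≤ u
    · simp [ok, h, le_trans hab h]
    · simp [ok, h]

lemma gre_char : ∀ (n : Nat) (seg : List Int), seg.length = n → ∀ t,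
    gre t seg = (valley seg && okEnds t seg) := by
  intro n
  induction n with
  | zero =>
    intro seg h t
    rw [List.length_eq_zero_iff] at h
    subst h
    rw [gre]; rfl
  | succ m ih =>
    intro seg hlen t
    match seg with
    | a :: rest =>
      rw [gre]
      cases rest with
      | nil =>
        rw [show lastOf a [] = a from rfl, if_neg (lt_irrefl a), gre]
        simp [valley, okEnds, lastOf, Bool.and_self]
      | cons c r2 =>
        rw [lastOf_cons]
        by_cases hab : a < lastOf c r2
        · rw [if_pos hab]
          set b := lastOf c r2 with hbdef
          set ds := (a :: c :: r2).dropLast with hdsdef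
          have hdhead : ds = a :: (c :: r2).dropLast := List.dropLast_cons₂
          set p := lastOf a ((c :: r2).dropLast) with hpdef
          have hsplit : ds ++ [b] = a :: c :: r2 := by
            rw [hdsdef, hbdef, ← lastOf_cons a c r2]
            exact cons_eq_dropLast_lastOf a (c :: r2)
          have hds1 : ds.dropLast ++ [p] = ds := by
            rw [hdhead, hpdef]
            exact cons_eq_dropLast_lastOf a ((c :: r2).dropLast)
          have hsplit2 : ds.dropLast ++ [p, b] = a :: c :: r2 := by
            rw [show ([p, b] : List Int) = [p] ++ [b] from rfl, ← List.append_assoc, hds1,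
              hsplit]
          have hdslen : ds.length = m := by
            rw [hdsdef]
            simpa using (by omega : (a :: c :: r2).length - 1 = m)
          have E : valley (a :: c :: r2) = (valley ds && decide (p ≤ b)) := by
            by_cases h1 : valley (a :: c :: r2) = true
            · have hds := valley_dropLast ds b (by rw [hsplit]; exact h1)
              have hpb : p ≤ b := by
                by_contra hc
                push_neg at hc
                have h3 := valley_desc_end ds.dropLast p b (by rw [hsplit2]; exact h1) hc
                rw [hsplit2] at h3
                have h4 := noninc_ge_lastOf a (c :: r2) h3
                rw [lastOf_cons, ← hbdef] at h4
                omega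
              simp [h1, hds, hpb]
            · have h2 : ¬ (valley ds = true ∧ p ≤ b) := by
                rintro ⟨hv, hpb⟩
                refine h1 ?_
                rw [← hsplit2]
                exact valley_append_last ds.dropLast p b (by rw [hds1]; exact hv) hpb
              rw [eq_false_of_ne_true h1]
              cases hv : valley ds with
              | false => simp [hv]
              | true =>
                simp [hv]
                exact not_le.mp (fun hpb => h2 ⟨hv, hpb⟩)
          have IH := ih ds hdslen (some b)
          rw [IH]
          have hOk : okEnds (some b) ds = (decide (a ≤ b) && decide (p ≤ b)) := by
            rw [hdhead, okEnds, ← hpdef]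
            rfl
          rw [hOk, decide_eq_true (le_of_lt hab), Bool.true_and, E]
          rw [okEnds, lastOf_cons, ← hbdef]
          cases hvd : valley ds <;> cases hp : decide (p ≤ b) <;>
            simp [ok_and_left t a b (le_of_lt hab)]
        · rw [if_neg hab]
          set b := lastOf c r2 with hbdef
          have hba : b ≤ a := not_lt.mp hab
          have IH := ih (c :: r2)
            (by simpa using (by omega : (a :: c :: r2).length - 1 = m)) (some a)
          rw [IH, okEnds, valley, okEnds, lastOf_cons, ← hbdef]
          by_cases hac : a < c
          · rw [if_pos hac]
            cases hnd : nondec (c :: r2) with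
            | true =>
              have h5 := nondec_le_lastOf c r2 hnd
              rw [← hbdef] at h5
              omega
            | false => simp [hnd, ok, not_le.mpr hac]
          · rw [if_neg hac]
            have h1 : ok (some a) c = true := by simp [ok, not_lt.mp hac]
            have h2 : ok (some a) b = true := by simp [ok, hba]
            rw [h1, h2]
            cases hv : valley (c :: r2)
            · simp
            · simp [Bool.and_comm (ok t a) (ok t b), ok_and_left t b a hba]

lemma foldl_aStep_false (cube : List Int) (xs : List Int) (stack : List Int) (l r : Int) :
    (xs.foldl (aStep cube) (stack, l, r, false)) = (stack, l, r, false) := by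
  induction xs with
  | nil => rfl
  | cons x ys ih => rw [List.foldl_cons, aStep]; exact ih

lemma okEnds_none (l : List Int) : okEnds none l = true := by
  cases l <;> simp [okEnds, ok]

lemma gre_none (l : List Int) : gre none l = valley l := by
  rw [gre_char l.length l rfl none, okEnds_none, Bool.and_true]

lemma pyGetD_natCast_zero (cube : List Int) (k : Nat) :
    PySem.List.pyGetD cube (k : Int) 0 = cube.getD k 0 := by
  rw [PySem.List.pyGetD_of_nonneg cube 0 (by positivity)]
  simp

lemma pyGetD_last (stack : List Int) (h : stack ≠ []) :
    PySem.List.pyGetD stack ((stack.length : Int) - 1) 0 = stack.getLast h := by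
  have hpos : 0 < stack.length := List.length_pos_iff.mpr h
  have hp : (0 : Int) ≤ (stack.length : Int) - 1 := by omega
  rw [PySem.List.pyGetD_of_nonneg stack 0 hp]
  have ht : ((stack.length : Int) - 1).toNat = stack.length - 1 := by omega
  rw [ht, List.getLast_eq_getElem, List.getD_eq_getElem stack 0 (by omega)]

lemma take_drop_cons (cube : List Int) (ln m : Nat) (h : ln < cube.length) :
    (cube.drop ln).take (m+1) = cube.getD ln 0 :: ((cube.drop (ln+1)).take m) := by
  rw [List.drop_eq_getElem_cons h, List.take_succ_cons, List.getD_eq_getElem cube 0 h]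

lemma lastOf_take_drop (cube : List Int) : ∀ (m ln : Nat), ln + m < cube.length →
    lastOf (cube.getD ln 0) ((cube.drop (ln+1)).take m) = cube.getD (ln+m) 0 := by
  intro m
  induction m with
  | zero => intro ln h; simp [lastOf]
  | succ m ih =>
    intro ln h
    rw [take_drop_cons cube (ln+1) m (by omega), lastOf_cons, ih (ln+1) (by omega),
      show ln + 1 + m = ln + (m+1) by omega]

lemma dropLast_take_drop (cube : List Int) (ln m : Nat) (h : ln + m + 1 ≤ cube.length) :
    ((cube.drop ln).take (m+1)).dropLast = (cube.drop ln).take m := by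
  have hlen : ((cube.drop ln).take (m+1)).length = m+1 := by
    simp
    omega
  rw [List.dropLast_eq_take, hlen]
  simp [List.take_take]

lemma fold_inv (cube : List Int) : ∀ (m ln : Nat) (stack : List Int),
    stack.length + m = cube.length → ln + m ≤ cube.length →
    ((PySem.List.pyRange (stack.length) cube.length 1).foldl (aStep cube)
       (stack, (ln : Int), (ln : Int) + (m : Int) - 1, true)).2.2.2
      = gre stack.getLast? ((cube.drop ln).take m) := by
  intro m
  induction m with
  | zero =>
    intro ln stack h1 h2
    rw [PySem.List.pyRange_one_eq_nil (by exact_mod_cast le_of_eq (by omega : cube.length = stack.length)),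
      List.foldl_nil, List.take_zero, gre]
  | succ m ih =>
    intro ln stack h1 h2
    have hxlt : (stack.length : Int) < (cube.length : Int) := by exact_mod_cast (by omega : stack.length < cube.length)
    rw [PySem.List.pyRange_one_cons hxlt, List.foldl_cons]
    have hr : (ln : Int) + ((m+1 : Nat) : Int) - 1 = ((ln + m : Nat) : Int) := by push_cast; ring
    rw [hr]
    simp only [aStep, if_true, pyGetD_natCast_zero]
    rw [take_drop_cons cube ln m (by omega)]
    rw [gre]
    rw [lastOf_take_drop cube m ln (by omega)]
    rw [← take_drop_cons cube ln m (by omega), dropLast_take_drop cube ln m (by omega)]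
    have hr' : ((ln + m : Nat) : Int) - 1 = (ln : Int) + (m : Int) - 1 := by push_cast; ring
    have hl' : (ln : Int) + 1 = ((ln + 1 : Nat) : Int) := by push_cast; ring
    have hr'' : ((ln + m : Nat) : Int) = ((ln + 1 : Nat) : Int) + (m : Int) - 1 := by push_cast; ring
    by_cases hlt : cube.getD ln 0 < cube.getD (ln+m) 0
    · rw [if_pos hlt, if_pos hlt]
      by_cases hst : stack = []
      · subst hst
        rw [if_pos rfl]
        simp only [List.nil_append]
        rw [show ((List.length ([] : List Int) : Int) + 1) = ((List.length [cube.getD (ln+m) 0] : Nat) : Int) by simp]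
        rw [hr']
        have := ih ln [cube.getD (ln+m) 0] (by simp at h1 ⊢; omega) (by omega)
        rw [this]
        rw [show ([cube.getD (ln+m) 0] : List Int).getLast? = some (cube.getD (ln+m) 0) from rfl]
        rw [show (([] : List Int)).getLast? = none from rfl]
        rw [show ok none (cube.getD (ln+m) 0) = true from rfl, Bool.true_and]
      · rw [if_neg hst, pyGetD_last stack hst, List.getLast?_eq_getLast hst]
        by_cases hle : cube.getD (ln+m) 0 ≤ stack.getLast hst
        · rw [if_pos hle]
          have hlen : (stack ++ [cube.getD (ln+m) 0]).length = stack.length + 1 := by simp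
          rw [show ((stack.length : Int) + 1) = ((stack ++ [cube.getD (ln+m) 0]).length : Int) by rw [hlen]; push_cast; ring]
          rw [hr']
          have := ih ln (stack ++ [cube.getD (ln+m) 0]) (by simp; omega) (by omega)
          rw [this, List.getLast?_concat]
          rw [show ok (some (stack.getLast hst)) (cube.getD (ln+m) 0) = true by simp only [ok]; exact decide_eq_true hle, Bool.true_and]
        · rw [if_neg hle, foldl_aStep_false]
          rw [show ok (some (stack.getLast hst)) (cube.getD (ln+m) 0) = false by simp only [ok]; exact decide_eq_false hle]
          rfl
    · rw [if_neg hlt, if_neg hlt]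
      by_cases hst : stack = []
      · subst hst
        rw [if_pos rfl]
        simp only [List.nil_append]
        rw [show ((List.length ([] : List Int) : Int) + 1) = ((List.length [cube.getD ln 0] : Nat) : Int) by simp]
        rw [hl', hr'']
        have := ih (ln+1) [cube.getD ln 0] (by simp at h1 ⊢; omega) (by omega)
        rw [this]
        rw [show ([cube.getD ln 0] : List Int).getLast? = some (cube.getD ln 0) from rfl]
        rw [show (([] : List Int)).getLast? = none from rfl]
        rw [show ok none (cube.getD ln 0) = true from rfl, Bool.true_and]
      · rw [if_neg hst, pyGetD_last stack hst, List.getLast?_eq_getLast hst]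
        by_cases hle : cube.getD ln 0 ≤ stack.getLast hst
        · rw [if_pos hle]
          have hlen : (stack ++ [cube.getD ln 0]).length = stack.length + 1 := by simp
          rw [show ((stack.length : Int) + 1) = ((stack ++ [cube.getD ln 0]).length : Int) by rw [hlen]; push_cast; ring]
          rw [hl', hr'']
          have := ih (ln+1) (stack ++ [cube.getD ln 0]) (by simp; omega) (by omega)
          rw [this, List.getLast?_concat]
          rw [show ok (some (stack.getLast hst)) (cube.getD ln 0) = true by simp only [ok]; exact decide_eq_true hle, Bool.true_and]
        · rw [if_neg hle, foldl_aStep_false]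
          rw [show ok (some (stack.getLast hst)) (cube.getD ln 0) = false by simp only [ok]; exact decide_eq_false hle]
          rfl

-- ===== VERDICT (by name: the statement is the Claim_ definition above) =====
theorem check_stack_spec : Claim_equal_check_stack := by
  intro cube _
  unfold Spec_check_stack check_stack check_stack_alt
  have h := fold_inv cube cube.length 0 [] (by simp) (by simp)
  simp at h
  rw [h, gre_none, (bLoop_eq cube).2]
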